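-- pv_equiv track=rewrite | github.com/mbjackson-capp/adventofcode | 2023/day2.py | min_viable_cubeset
-- ===== SOURCE A (Python) =====
-- def min_viable_cubeset(game):
--     """
--     Determine the smallest number of red, green, and blue cubes possible,
--     given a set of draws from the bag (a "game".)
--
--     Inputs:
--         -game (list of lists of tuples): Each list represents a draw.
--         Each item in a draw list is a tuple of form (int, "color"),
--         representing the number of cubes of that color in that draw.
--     Returns:
--         -min_red, min_green, min_blue (tuple of ints):
--         correct number for each color
--     """
--     color_maxes = {"red": 0, "green": 0, "blue": 0}
--
--     for draw in game:
--         for this_tuple in draw: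
--             num, color = this_tuple
--             if num > color_maxes[color]:
--                 color_maxes[color] = num
--
--     return color_maxes["red"], color_maxes["green"], color_maxes["blue"]
-- ===== SOURCE B (Python) =====
-- def min_viable_cubeset(game):
--     """
--     Smallest bag of (red, green, blue) cubes that makes every draw in the
--     game possible: for each color, the largest count seen in any draw
--     (a bag never holds fewer than zero cubes of a color).
--     """
--     slot = {"red": 0, "green": 1, "blue": 2}
--     flat = [(slot[c], n) for draw in game for n, c in draw]
--     return tuple(max([0] + [n for i, n in flat if i == k]) for k in range(3))
-- ===== Notes on version B (the rewrite author's own statement) =====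
-- stated objective: alternative
-- what changed: A's single combined pass updating a zero-initialized color->max dict is replaced by a decoding pass mapping each color to a slot index (the dict lookup raising KeyError on unknown colors, like A) followed by three independent per-slot scans, each taking max over 0 and that slot's counts; Pre_ excludes games mentioning a color other than red/green/blue, on which A raises KeyError.
import Mathlib
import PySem

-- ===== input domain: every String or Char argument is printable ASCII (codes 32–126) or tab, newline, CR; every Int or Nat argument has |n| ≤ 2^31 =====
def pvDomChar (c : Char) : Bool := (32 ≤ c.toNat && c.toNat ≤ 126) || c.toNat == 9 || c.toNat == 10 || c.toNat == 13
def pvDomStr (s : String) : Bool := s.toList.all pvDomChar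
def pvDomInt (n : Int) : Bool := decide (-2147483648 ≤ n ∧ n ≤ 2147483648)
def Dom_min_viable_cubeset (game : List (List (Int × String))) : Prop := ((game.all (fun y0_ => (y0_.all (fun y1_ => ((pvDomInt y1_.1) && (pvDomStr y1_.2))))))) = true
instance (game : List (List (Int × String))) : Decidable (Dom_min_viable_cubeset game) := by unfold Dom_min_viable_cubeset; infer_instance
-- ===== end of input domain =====

-- B replaces A's single dict-accumulator pass by a color→slot decoding pass (same KeyError domain as A) followed by three independent per-slot max scans, each over 0 and that slot's counts.


-- ===== PORT A =====
-- loop body of A: 'num, color = this_tuple; if num > color_maxes[color]: color_maxes[color] = num';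
-- the dict lookup color_maxes[color] is PySem.Dict.get?, none = KeyError (excluded by Pre_)
def stepA (d : PySem.Dict String Int) (p : Int × String) : Option (PySem.Dict String Int) :=
  match d.get? p.2 with
  | none => none
  | some m => some (if m < p.1 then d.insert p.2 p.1 else d)

def min_viable_cubeset (game : List (List (Int × String))) : Int × Int × Int :=
  let init : PySem.Dict String Int :=
    ((PySem.Dict.empty.insert "red" 0).insert "green" 0).insert "blue" 0
  match game.foldlM (fun d draw => draw.foldlM stepA d) init with
  | none => (0, 0, 0)   -- KeyError: unreachable under Pre_
  | some d => (d.getD "red" 0, d.getD "green" 0, d.getD "blue" 0)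

-- ===== PORT B =====
-- slot = {"red": 0, "green": 1, "blue": 2}; slot[c] is get?, none = KeyError (excluded by Pre_)
def slotDict : PySem.Dict String Int := PySem.Dict.ofList [("red", 0), ("green", 1), ("blue", 2)]

-- max([0] + [n for i, n in flat if i == k]): the list starts with 0, so Python's max never raises;
-- ported as PySem.List.max? on that nonempty list, getD 0 only discharging the Option
def slotMaxB (flat : List (Int × Int)) (k : Int) : Int :=
  (PySem.List.max? ((0 : Int) :: (flat.filter (fun q => q.1 == k)).map (·.2)) (fun n => n)).getD 0

def min_viable_cubeset_alt (game : List (List (Int × String))) : Int × Int × Int :=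
  match (game.flatMap (fun draw => draw)).mapM
      (fun p => (slotDict.get? p.2).map (fun i => (i, p.1))) with
  | none => (0, 0, 0)   -- KeyError: unreachable under Pre_
  | some flat => (slotMaxB flat 0, slotMaxB flat 1, slotMaxB flat 2)

-- ===== PRECONDITION & SPEC =====
-- Pre_ excludes exactly the games containing a color other than "red"/"green"/"blue": there A raises KeyError.
def Pre_min_viable_cubeset (game : List (List (Int × String))) : Prop :=
  ∀ draw ∈ game, ∀ p ∈ draw, p.2 = "red" ∨ p.2 = "green" ∨ p.2 = "blue"
instance (game : List (List (Int × String))) : Decidable (Pre_min_viable_cubeset game) := by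
  unfold Pre_min_viable_cubeset; infer_instance
def pvWitness_min_viable_cubeset : (List (List (Int × String))) :=
  [[(3, "red"), (1, "blue")], [(2, "green"), (5, "red")]]

def Spec_min_viable_cubeset (game : List (List (Int × String))) (out : Int × Int × Int) : Prop := out = min_viable_cubeset_alt game
instance (game : List (List (Int × String))) (out : Int × Int × Int) : Decidable (Spec_min_viable_cubeset game out) := by unfold Spec_min_viable_cubeset; infer_instance

-- ===== CLAIM (what is proved, stated in full; the proofs are below) =====
def Claim_equal_min_viable_cubeset : Prop := ∀ (game : List (List (Int × String))), Dom_min_viable_cubeset game → Pre_min_viable_cubeset game → Spec_min_viable_cubeset game (min_viable_cubeset game)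

-- ===== LEMMAS AND PROOFS =====

-- the dict state of A's loop: always exactly the three keys, in insertion order
def D3 (r g b : Int) : PySem.Dict String Int :=
  ((PySem.Dict.empty.insert "red" r).insert "green" g).insert "blue" b

-- A's update 'if m < n then n else m'
def gmax (m n : Int) : Int := if m < n then n else m

-- the numbers of a given color in one draw / in the whole game
def colorNums (c : String) (l : List (Int × String)) : List Int :=
  (l.filter (fun p => p.2 == c)).map (·.1)
def allNums (c : String) (game : List (List (Int × String))) : List Int :=
  game.flatMap (colorNums c)

lemma insert_D3_red (r g b n : Int) : (D3 r g b).insert "red" n = D3 n g b := by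
  apply PySem.Dict.ext
  simp [D3, PySem.Dict.insert, PySem.Dict.empty, PySem.Dict.contains]

lemma insert_D3_green (r g b n : Int) : (D3 r g b).insert "green" n = D3 r n b := by
  apply PySem.Dict.ext
  simp [D3, PySem.Dict.insert, PySem.Dict.empty, PySem.Dict.contains]

lemma insert_D3_blue (r g b n : Int) : (D3 r g b).insert "blue" n = D3 r g n := by
  apply PySem.Dict.ext
  simp [D3, PySem.Dict.insert, PySem.Dict.empty, PySem.Dict.contains]

lemma get?_D3_red (r g b : Int) : (D3 r g b).get? "red" = some r := by
  simp [D3, PySem.Dict.get?, PySem.Dict.insert, PySem.Dict.empty, PySem.Dict.contains]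
lemma get?_D3_green (r g b : Int) : (D3 r g b).get? "green" = some g := by
  simp [D3, PySem.Dict.get?, PySem.Dict.insert, PySem.Dict.empty, PySem.Dict.contains]
lemma get?_D3_blue (r g b : Int) : (D3 r g b).get? "blue" = some b := by
  simp [D3, PySem.Dict.get?, PySem.Dict.insert, PySem.Dict.empty, PySem.Dict.contains]

lemma getD_D3 (r g b : Int) :
    (D3 r g b).getD "red" 0 = r ∧ (D3 r g b).getD "green" 0 = g ∧ (D3 r g b).getD "blue" 0 = b := by
  refine ⟨?_, ?_, ?_⟩ <;>
    simp [D3, PySem.Dict.getD, PySem.Dict.get?, PySem.Dict.insert, PySem.Dict.empty, PySem.Dict.contains]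

-- A's inner loop over one draw
lemma foldlM_draw (draw : List (Int × String)) :
    ∀ r g b : Int, (∀ p ∈ draw, p.2 = "red" ∨ p.2 = "green" ∨ p.2 = "blue") →
    List.foldlM stepA (D3 r g b) draw
      = some (D3 ((colorNums "red" draw).foldl gmax r)
                 ((colorNums "green" draw).foldl gmax g)
                 ((colorNums "blue" draw).foldl gmax b)) := by
  induction draw with
  | nil => intro r g b _; simp [colorNums]
  | cons p t ih =>
    intro r g b h
    have hp := h p (by simp)
    have ht : ∀ q ∈ t, q.2 = "red" ∨ q.2 = "green" ∨ q.2 = "blue" :=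
      fun q hq => h q (by simp [hq])
    obtain ⟨n, c⟩ := p
    rcases hp with hc | hc | hc <;> subst hc
    · simp only [List.foldlM_cons, stepA, get?_D3_red, insert_D3_red]
      rw [show (if r < n then D3 n g b else D3 r g b) = D3 (gmax r n) g b from by
        unfold gmax; split <;> rfl]
      show List.foldlM stepA (D3 (gmax r n) g b) t = _
      rw [ih _ _ _ ht]
      simp [colorNums]
    · simp only [List.foldlM_cons, stepA, get?_D3_green, insert_D3_green]
      rw [show (if g < n then D3 r n b else D3 r g b) = D3 r (gmax g n) b from by
        unfold gmax; split <;> rfl]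
      show List.foldlM stepA (D3 r (gmax g n) b) t = _
      rw [ih _ _ _ ht]
      simp [colorNums]
    · simp only [List.foldlM_cons, stepA, get?_D3_blue, insert_D3_blue]
      rw [show (if b < n then D3 r g n else D3 r g b) = D3 r g (gmax b n) from by
        unfold gmax; split <;> rfl]
      show List.foldlM stepA (D3 r g (gmax b n)) t = _
      rw [ih _ _ _ ht]
      simp [colorNums]

-- A's outer loop over the game
lemma foldlM_game (game : List (List (Int × String))) :
    ∀ r g b : Int, (∀ draw ∈ game, ∀ p ∈ draw, p.2 = "red" ∨ p.2 = "green" ∨ p.2 = "blue") →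
    List.foldlM (fun d draw => List.foldlM stepA d draw) (D3 r g b) game
      = some (D3 ((allNums "red" game).foldl gmax r)
                 ((allNums "green" game).foldl gmax g)
                 ((allNums "blue" game).foldl gmax b)) := by
  induction game with
  | nil => intro r g b _; simp [allNums]
  | cons d ds ih =>
    intro r g b h
    have hd := h d (by simp)
    have hds : ∀ draw ∈ ds, ∀ p ∈ draw, p.2 = "red" ∨ p.2 = "green" ∨ p.2 = "blue" :=
      fun draw hdr => h draw (by simp [hdr])
    rw [List.foldlM_cons, foldlM_draw d _ _ _ hd]
    show List.foldlM (fun d draw => List.foldlM stepA d draw) (D3 _ _ _) ds = _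
    rw [ih _ _ _ hds]
    simp [allNums, List.foldl_append]

-- max?'s fold over a nonempty list, started after its first element
lemma max?_cons_eq (l : List Int) : ∀ a : Int,
    PySem.List.max? (a :: l) (fun n => n) = some (l.foldl gmax a) := by
  induction l with
  | nil => intro a; rfl
  | cons x t ih =>
    intro a
    have hstep : PySem.List.max? (a :: x :: t) (fun n => n)
        = PySem.List.max? (gmax a x :: t) (fun n => n) := by
      simp only [PySem.List.max?, List.foldl_cons]
      exact congrArg (fun s => List.foldl _ s t) (by unfold gmax; split <;> rfl)
    rw [hstep, ih]
    simp [gmax]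

-- the slot index B assigns to each (valid) color
def slotVal (c : String) : Int := if c = "red" then 0 else if c = "green" then 1 else 2

lemma mapM_slot (l : List (Int × String)) (h : ∀ p ∈ l, p.2 = "red" ∨ p.2 = "green" ∨ p.2 = "blue") :
    l.mapM (fun p => (slotDict.get? p.2).map (fun i => (i, p.1)))
      = some (l.map (fun p => (slotVal p.2, p.1))) := by
  induction l with
  | nil => rfl
  | cons p t ih =>
    have hp := h p (by simp)
    have ht := fun q hq => h q (List.mem_cons_of_mem p hq)
    have hr : slotDict.get? "red" = some 0 := by decide
    have hg : slotDict.get? "green" = some 1 := by decide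
    have hb : slotDict.get? "blue" = some 2 := by decide
    rcases hp with hc | hc | hc <;>
      simp [List.mapM_cons, hc, hr, hg, hb, slotVal, ih ht]

lemma filter_slot (c : String) (k : Int)
    (hck : (c = "red" ∧ k = 0) ∨ (c = "green" ∧ k = 1) ∨ (c = "blue" ∧ k = 2)) :
    ∀ l : List (Int × String), (∀ p ∈ l, p.2 = "red" ∨ p.2 = "green" ∨ p.2 = "blue") →
    ((l.map (fun p => (slotVal p.2, p.1))).filter (fun q => q.1 == k)).map (·.2)
      = colorNums c l := by
  intro l
  induction l with
  | nil => intro _; rfl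
  | cons p t ih =>
    intro h
    have hp := h p (by simp)
    have ht := ih (fun q hq => h q (List.mem_cons_of_mem p hq))
    rcases hp with hc | hc | hc <;> rcases hck with ⟨hc', hk⟩ | ⟨hc', hk⟩ | ⟨hc', hk⟩ <;>
      subst hk <;> simp_all [colorNums, slotVal]

-- the whole-game color lists seen through the flattened list
lemma allNums_flat (c : String) (game : List (List (Int × String))) :
    colorNums c (game.flatMap (fun draw => draw)) = allNums c game := by
  have happ : ∀ l1 l2 : List (Int × String),
      colorNums c (l1 ++ l2) = colorNums c l1 ++ colorNums c l2 := by
    intro l1 l2; simp [colorNums, List.filter_append]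
  induction game with
  | nil => rfl
  | cons d ds ih => rw [List.flatMap_cons, happ, ih]; simp [allNums]

-- ===== VERDICT (by name: the statement is the Claim_ definition above) =====
theorem min_viable_cubeset_spec : Claim_equal_min_viable_cubeset := by
  intro game _ hpre
  unfold Spec_min_viable_cubeset min_viable_cubeset min_viable_cubeset_alt
  have h := foldlM_game game 0 0 0 hpre
  simp only [show ((PySem.Dict.empty.insert "red" (0:Int)).insert "green" 0).insert "blue" 0 = D3 0 0 0 from rfl]
  rw [h]
  have hflat : ∀ p ∈ game.flatMap (fun draw => draw), p.2 = "red" ∨ p.2 = "green" ∨ p.2 = "blue" := by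
    intro p hp
    obtain ⟨draw, hd, hpd⟩ := List.mem_flatMap.mp hp
    exact hpre draw hd p hpd
  rw [mapM_slot _ hflat]
  simp only [(getD_D3 _ _ _).1, (getD_D3 _ _ _).2.1, (getD_D3 _ _ _).2.2, slotMaxB,
    filter_slot "red" 0 (by simp) _ hflat,
    filter_slot "green" 1 (by simp) _ hflat,
    filter_slot "blue" 2 (by simp) _ hflat,
    allNums_flat, max?_cons_eq, Option.getD_some]
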